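-- pv_equiv track=rewrite | github.com/ryanmalonzo/advent-of-code-2024 | day_02/part_1.py | check_pairs
-- ===== SOURCE A (Python) =====
-- def check_pairs(report: list[int], a: int, index_a: int) -> bool:
--     index_b = index_a + 1
--
--     if index_b == len(report):
--         return True
--
--     b = report[index_b]
--     c = b - a
--
--     if not (c >= 1 and c <= 3):
--         return False
--
--     return check_pairs(report, b, index_b)
-- ===== SOURCE B (Python) =====
-- def check_pairs(report: list[int], a: int, index_a: int) -> bool:
--     seq = [a] + report[index_a + 1:]
--     return all(1 <= y - x <= 3 for x, y in zip(seq, seq[1:]))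
-- ===== Notes on version B (the rewrite author's own statement) =====
-- stated objective: simpler
-- what changed: Replaced the index-passing recursion with a slice of the remaining suffix followed by a single zip/all pairwise check.
-- outside the precondition, e.g. on check_pairs([3, 4, 5], 2, -2): A returns False, B returns True
import Mathlib
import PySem

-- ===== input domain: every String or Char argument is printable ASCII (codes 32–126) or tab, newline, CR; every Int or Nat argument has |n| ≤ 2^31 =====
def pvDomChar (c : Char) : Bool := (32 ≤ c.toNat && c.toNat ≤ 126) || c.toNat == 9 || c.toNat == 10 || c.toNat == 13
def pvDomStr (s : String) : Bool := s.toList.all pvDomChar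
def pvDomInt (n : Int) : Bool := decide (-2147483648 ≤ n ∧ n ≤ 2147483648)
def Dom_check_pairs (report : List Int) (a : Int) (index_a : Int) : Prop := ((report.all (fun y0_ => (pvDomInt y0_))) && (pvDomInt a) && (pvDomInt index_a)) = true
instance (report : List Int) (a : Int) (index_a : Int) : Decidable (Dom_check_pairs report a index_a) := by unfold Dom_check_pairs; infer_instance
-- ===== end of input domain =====

-- B replaces A's index-passing recursion by a slice plus a single zip/all pairwise check (simpler; same cost).

-- ===== PORT A =====
def check_pairs (report : List Int) (a : Int) (index_a : Int) : Bool :=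
  let index_b := index_a + 1
  if index_b = (report.length : Int) then true
  else
    match h : PySem.List.pyGet? report index_b with
    | none => false   -- Python raises IndexError here (outside Pre_)
    | some b =>
      let c := b - a
      if ¬ (c ≥ 1 ∧ c ≤ 3) then false
      else check_pairs report b index_b
termination_by ((report.length : Int) - (index_a + 1)).toNat
decreasing_by
  have hin : PySem.Raise.InRange report.length (index_a + 1) := by
    by_contra hc
    rw [(PySem.List.pyGet?_eq_none_iff report (index_a + 1)).2 hc] at h
    exact absurd h (by simp)
  simp [PySem.Raise.InRange] at hin
  omega

-- ===== PORT B =====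
def check_pairs_alt (report : List Int) (a : Int) (index_a : Int) : Bool :=
  let seq := a :: PySem.List.slice report (some (index_a + 1)) none
  (seq.zip seq.tail).all (fun p => decide (1 ≤ p.2 - p.1 ∧ p.2 - p.1 ≤ 3))

-- ===== PRECONDITION & SPEC =====
-- Pre_ excludes (a) index_a + 1 out of [-len, len], where A raises IndexError, and
-- (b) negative in-range index_a + 1, where A returns a value only via Python's
-- negative-index wraparound, re-reading the suffix and then the whole list — an
-- accidental behaviour of the recursion that no caller relies on.
def Pre_check_pairs (report : List Int) (a : Int) (index_a : Int) : Prop :=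
  0 ≤ index_a + 1 ∧ index_a + 1 ≤ (report.length : Int)
instance (report : List Int) (a : Int) (index_a : Int) : Decidable (Pre_check_pairs report a index_a) := by unfold Pre_check_pairs; infer_instance
def pvWitness_check_pairs : List Int × Int × Int := ([1, 3, 6], 1, 0)

def Spec_check_pairs (report : List Int) (a : Int) (index_a : Int) (out : Bool) : Prop := out = check_pairs_alt report a index_a
instance (report : List Int) (a : Int) (index_a : Int) (out : Bool) : Decidable (Spec_check_pairs report a index_a out) := by unfold Spec_check_pairs; infer_instance

-- ===== CLAIM (what is proved, stated in full; the proofs are below) =====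
def Claim_equal_check_pairs : Prop := ∀ (report : List Int) (a : Int) (index_a : Int), Dom_check_pairs report a index_a → Pre_check_pairs report a index_a → Spec_check_pairs report a index_a (check_pairs report a index_a)

-- ===== LEMMAS AND PROOFS =====

-- the common chain predicate both ports compute under Pre_
def pairsOK : Int → List Int → Bool
  | _, [] => true
  | a, b :: t => (decide (1 ≤ b - a ∧ b - a ≤ 3)) && pairsOK b t

theorem check_pairs_eq_pairsOK (k : Nat) : ∀ (report : List Int) (a : Int) (n : Nat),
    n ≤ report.length → report.length - n = k →
    check_pairs report a ((n : Int) - 1) = pairsOK a (report.drop n) := by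
  induction k with
  | zero =>
    intro report a n hle hk
    have hn : n = report.length := by omega
    rw [check_pairs]
    simp [hn, pairsOK]
  | succ k ih =>
    intro report a n hle hk
    have hlt : n < report.length := by omega
    rw [check_pairs]
    have h1 : (n : Int) - 1 + 1 = (n : Int) := by ring
    rw [h1]
    have hne : ¬ ((n : Int) = (report.length : Int)) := by exact_mod_cast Nat.ne_of_lt hlt
    rw [if_neg hne]
    have hget : PySem.List.pyGet? report (n : Int) = some report[n] := by
      rw [PySem.List.pyGet?_natCast]
      exact List.getElem?_eq_getElem hlt
    rw [hget]
    have hdrop : report.drop n = report[n] :: report.drop (n + 1) :=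
      List.drop_eq_getElem_cons hlt
    rw [hdrop, pairsOK]
    split
    · rename_i heq
      exact absurd heq (by simp)
    · rename_i b heq
      have hb : b = report[n] := by
        injection heq with h'
        exact h'.symm
      rw [← hb]
      show (if ¬ (b - a ≥ 1 ∧ b - a ≤ 3) then false
            else check_pairs report b ((n : Int))) =
           (decide (1 ≤ b - a ∧ b - a ≤ 3) && pairsOK b (report.drop (n + 1)))
      by_cases hc : (1 ≤ b - a ∧ b - a ≤ 3)
      · rw [if_neg (not_not_intro ⟨hc.1, hc.2⟩)]
        have hrec := ih report b (n + 1) (by omega) (by omega)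
        rw [show ((n : Int)) = ((n + 1 : Nat) : Int) - 1 by push_cast; ring]
        rw [hrec]
        simp [hc]
      · rw [if_pos (fun h' => hc ⟨h'.1, h'.2⟩), decide_eq_false hc, Bool.false_and]

theorem zip_all_eq_pairsOK : ∀ (l : List Int) (a : Int),
    (((a :: l).zip (a :: l).tail).all (fun p => decide (1 ≤ p.2 - p.1 ∧ p.2 - p.1 ≤ 3)))
      = pairsOK a l := by
  intro l
  induction l with
  | nil => intro a; simp [pairsOK]
  | cons b t ih =>
    intro a
    simp only [List.tail_cons, List.zip_cons_cons, List.all_cons]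
    rw [show ((b :: t).zip t) = ((b :: t).zip (b :: t).tail) from rfl]
    rw [ih b, pairsOK]

-- ===== VERDICT (by name: the statement is the Claim_ definition above) =====
theorem check_pairs_spec : Claim_equal_check_pairs := by
  intro report a index_a _ hpre
  obtain ⟨h0, h1⟩ := hpre
  unfold Spec_check_pairs check_pairs_alt
  set n : Nat := (index_a + 1).toNat with hn
  have hcast : (n : Int) = index_a + 1 := Int.toNat_of_nonneg h0
  have hle : n ≤ report.length := by omega
  have hA : check_pairs report a index_a = pairsOK a (report.drop n) := by
    have := check_pairs_eq_pairsOK (report.length - n) report a n hle rfl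
    rw [show ((n : Int) - 1) = index_a by omega] at this
    exact this
  have hslice : PySem.List.slice report (some (index_a + 1)) none = report.drop n := by
    rw [PySem.List.slice_from report h0]
  rw [hA]
  simp only [hslice]
  rw [zip_all_eq_pairsOK]
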